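-- pv_equiv track=rewrite | github.com/redknox/gobang | gobang.py | get_allow_persion
-- ===== SOURCE A (Python) =====
-- def get_allow_persion(id):
--     st = (16, 8, 4, 2, 1)
--     i = 0
--     re = []
--     for ssi in st:
--         if id & ssi == 0:
--             re.append(i)
--         i = i + 1
--     return re
-- ===== SOURCE B (Python) =====
-- def get_allow_persion(id):
--     s = format(id & 31, '05b')
--     return [i for i, c in enumerate(s) if c == '0']
-- ===== Notes on version B (the rewrite author's own statement) =====
-- stated objective: idiomatic
-- what changed: B masks the value to its low bits, formats it as a fixed-width binary string with format(.., '05b') and collects the indices of zero characters via enumerate, replacing A's manual counter loop over the explicit bit masks.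
import Mathlib
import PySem

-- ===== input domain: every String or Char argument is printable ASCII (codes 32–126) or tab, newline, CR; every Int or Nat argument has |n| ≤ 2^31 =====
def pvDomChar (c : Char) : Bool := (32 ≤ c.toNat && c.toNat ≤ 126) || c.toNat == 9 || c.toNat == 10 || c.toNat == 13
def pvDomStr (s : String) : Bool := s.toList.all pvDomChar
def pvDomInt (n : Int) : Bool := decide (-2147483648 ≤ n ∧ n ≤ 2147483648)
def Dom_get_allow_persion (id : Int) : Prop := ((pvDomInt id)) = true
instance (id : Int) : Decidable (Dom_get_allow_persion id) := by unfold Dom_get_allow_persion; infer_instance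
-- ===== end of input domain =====

-- B formats the masked value as a fixed-width 5-bit binary string and collects the
-- positions of the '0' characters, instead of A's sequential mask-testing loop (objective: idiomatic).

-- ===== PORT A =====
def get_allow_persion (id : Int) : List Int :=
  let st : List Int := [16, 8, 4, 2, 1]
  let acc := st.foldl (fun (p : Int × List Int) ssi =>
      (p.1 + 1, if PySem.Int.band id ssi = 0 then p.2 ++ [p.1] else p.2)) (0, [])
  acc.2

-- ===== PORT B =====
-- format(m, '05b') for 0 ≤ m < 32: the five binary digits, most significant first (exact on that range)
def pvBin5 (m : Nat) : List Char :=
  (List.range 5).map (fun k => if m / 2 ^ (4 - k) % 2 = 1 then '1' else '0')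

def get_allow_persion_alt (id : Int) : List Int :=
  let m := PySem.Int.band id 31
  (PySem.List.enumerate (pvBin5 m.toNat)).filterMap
    (fun p => if p.2 = '0' then some p.1 else none)

-- ===== PRECONDITION & SPEC =====
def Spec_get_allow_persion (id : Int) (out : List Int) : Prop := out = get_allow_persion_alt id
instance (id : Int) (out : List Int) : Decidable (Spec_get_allow_persion id out) := by unfold Spec_get_allow_persion; infer_instance

-- ===== CLAIM (what is proved, stated in full; the proofs are below) =====
def Claim_equal_get_allow_persion : Prop := ∀ (id : Int), Dom_get_allow_persion id → Spec_get_allow_persion id (get_allow_persion id)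

-- ===== LEMMAS AND PROOFS =====

-- Nat: a low-bit mask only sees the value mod 32
lemma pv_nat_low (n k : Nat) (hk : k < 5) : n % 32 &&& 2 ^ k = n &&& 2 ^ k := by
  apply Nat.eq_of_testBit_eq; intro j
  rw [show (32:Nat) = 2 ^ 5 by norm_num,
      Nat.testBit_and, Nat.testBit_and, Nat.testBit_mod_two_pow, Nat.testBit_two_pow]
  by_cases hj : k = j
  · subst hj; simp [hk]
  · simp [hj]

lemma pv_nat_low31 (n : Nat) : n &&& 31 = n % 32 := by
  have := Nat.and_two_pow_sub_one_eq_mod n 5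
  norm_num at this
  exact this

-- Nat: complementing the low five bits turns a bit test into a subtraction
lemma pv_neg_mask (m k : Nat) (hk : k < 5) :
    2 ^ k - (2 ^ k &&& m) = (31 - m % 32) &&& 2 ^ k := by
  rw [Nat.and_comm (2 ^ k) m, ← pv_nat_low m k hk]
  have h : m % 32 < 32 := Nat.mod_lt _ (by norm_num)
  generalize m % 32 = mm at h ⊢
  interval_cases k <;> interval_cases mm <;> decide

-- Int: a single-bit mask below 32 only sees the value mod 32
lemma pv_band_pow (a : Int) (s : Int) (hs : s = 16 ∨ s = 8 ∨ s = 4 ∨ s = 2 ∨ s = 1) :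
    PySem.Int.band a s = PySem.Int.band (a % 32) s := by
  obtain ⟨k, hk, rfl⟩ : ∃ k, k < 5 ∧ s = ((2 ^ k : Nat) : Int) := by
    rcases hs with h|h|h|h|h <;> subst h
    · exact ⟨4, by norm_num, by norm_num⟩
    · exact ⟨3, by norm_num, by norm_num⟩
    · exact ⟨2, by norm_num, by norm_num⟩
    · exact ⟨1, by norm_num, by norm_num⟩
    · exact ⟨0, by norm_num, by norm_num⟩
  have h0 : 0 ≤ a % 32 := Int.emod_nonneg a (by norm_num)
  have h1 : a % 32 < 32 := Int.emod_lt_of_pos a (by norm_num)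
  have hts : (0:Int) ≤ ((2 ^ k : Nat) : Int) := by positivity
  have hst : (((2 ^ k : Nat) : Int)).toNat = 2 ^ k := Int.toNat_natCast _
  rw [PySem.Int.band.eq_1 a _, PySem.Int.band.eq_1 (a % 32) _]
  by_cases ha : 0 ≤ a
  · simp only [if_pos ha, if_pos h0, if_pos hts]
    have hN : (a % 32).toNat = a.toNat % 32 := by omega
    rw [hst, hN, pv_nat_low a.toNat k hk]
  · simp only [if_neg ha, if_pos hts, if_pos h0]
    have hr : (a % 32).toNat = 31 - (-a - 1).toNat % 32 := by omega
    rw [hst, hr]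
    exact congrArg _ (pv_neg_mask (-a - 1).toNat k hk)

-- Int: masking with 31 is reduction mod 32
lemma pv_band31 (a : Int) : PySem.Int.band a 31 = a % 32 := by
  rw [PySem.Int.band.eq_1]
  have h31 : (31:Int).toNat = 31 := rfl
  by_cases ha : 0 ≤ a
  · simp only [if_pos ha, show (0:Int) ≤ 31 by norm_num, if_pos]
    rw [h31, pv_nat_low31]
    omega
  · simp only [if_neg ha, show (0:Int) ≤ 31 by norm_num, if_pos]
    rw [h31, Nat.and_comm, pv_nat_low31]
    omega

lemma pv_A_mod (a : Int) : get_allow_persion a = get_allow_persion (a % 32) := by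
  simp only [get_allow_persion, List.foldl]
  rw [pv_band_pow a 16 (by tauto), pv_band_pow a 8 (by tauto), pv_band_pow a 4 (by tauto),
      pv_band_pow a 2 (by tauto), pv_band_pow a 1 (by tauto)]

lemma pv_alt_mod (a : Int) : get_allow_persion_alt a = get_allow_persion_alt (a % 32) := by
  simp only [get_allow_persion_alt, pv_band31, Int.emod_emod_of_dvd a (dvd_refl 32)]

lemma pv_small (n : Nat) (hn : n < 32) : get_allow_persion (↑n) = get_allow_persion_alt (↑n) := by
  interval_cases n <;> decide

-- ===== VERDICT (by name: the statement is the Claim_ definition above) =====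
theorem get_allow_persion_spec : Claim_equal_get_allow_persion := by
  intro id _
  unfold Spec_get_allow_persion
  rw [pv_A_mod, pv_alt_mod]
  have h0 : 0 ≤ id % 32 := Int.emod_nonneg id (by norm_num)
  have h1 : id % 32 < 32 := Int.emod_lt_of_pos id (by norm_num)
  have hc : ((id % 32).toNat : Int) = id % 32 := by omega
  rw [← hc]
  exact pv_small (id % 32).toNat (by omega)
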